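-- pv_equiv track=rewrite | github.com/ishandutta2007/ProjectEuler-2 | eu105.py | check_special_subset_sum
-- ===== SOURCE A (Python) =====
-- import itertools
--
-- def check_special_subset_sum(S):
--     S = sorted(S)
--
--     l = (len(S) + 1) // 2
--     r = l - 1
--
--     if sum(S[:l]) <= sum(S[-r:]):
--         return False
--
--     sums = []
--     for i in range(1, len(S) + 1):
--         sums += list(itertools.combinations(S, i))
--     sums = [sum(s) for s in sums]
--
--     if len(sums) != len(set(sums)):
--         return False
--
--     return True
-- ===== SOURCE B (Python) =====
-- def check_special_subset_sum(S):
--     S = sorted(S)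
--
--     l = (len(S) + 1) // 2
--     r = l - 1
--
--     if sum(S[:l]) <= sum(S[-r:]):
--         return False
--
--     reachable = set()
--     for x in S:
--         cands = {x} | {s + x for s in reachable}
--         if (cands & reachable) or len(cands) != len(reachable) + 1:
--             return False
--         reachable |= cands
--     return True
-- ===== Notes on version B (the rewrite author's own statement) =====
-- stated objective: alternative
-- what changed: Instead of materialising every itertools.combinations tuple of every size and comparing len(sums) with len(set(sums)), B grows a set of distinct non-empty subset sums one element at a time and returns False at the first collision.
import Mathlib
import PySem

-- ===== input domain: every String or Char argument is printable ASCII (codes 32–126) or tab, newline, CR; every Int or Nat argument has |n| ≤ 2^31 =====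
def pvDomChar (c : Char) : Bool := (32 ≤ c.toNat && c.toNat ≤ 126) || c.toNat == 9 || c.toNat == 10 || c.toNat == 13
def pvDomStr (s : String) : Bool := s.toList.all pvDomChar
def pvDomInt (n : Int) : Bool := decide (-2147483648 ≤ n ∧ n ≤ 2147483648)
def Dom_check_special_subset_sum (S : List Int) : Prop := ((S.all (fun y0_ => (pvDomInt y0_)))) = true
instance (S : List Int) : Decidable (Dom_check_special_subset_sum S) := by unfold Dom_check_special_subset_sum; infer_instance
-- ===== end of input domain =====

-- B replaces A's materialisation of every itertools.combinations tuple by an incremental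
-- set of non-empty subset sums, exiting at the first collision (objective: alternative).

-- ===== PORT A =====
-- itertools.combinations(S, i): the i-element subsequences of S, lexicographic by index
def pvCombos : Nat → List Int → List (List Int)
  | 0, _ => [[]]
  | _ + 1, [] => []
  | i + 1, a :: l => (pvCombos i l).map (a :: ·) ++ pvCombos (i + 1) l

def check_special_subset_sum (S : List Int) : Bool :=
  let T := PySem.List.sorted S (fun x => x) false
  let l : Int := PySem.Int.floordiv ((T.length : Int) + 1) 2
  let r : Int := l - 1
  if (PySem.List.slice T none (some l)).sum ≤ (PySem.List.slice T (some (-r)) none).sum then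
    false
  else
    let sums := (PySem.List.pyRange 1 ((T.length : Int) + 1) 1).foldl
      (fun acc i => acc ++ pvCombos i.toNat T) ([] : List (List Int))
    let sums := sums.map (fun s => s.sum)
    if sums.length ≠ (PySem.Set.ofList sums).length then false else true

-- ===== PORT B =====
-- B's loop: reachable = the distinct non-empty subset sums so far; fail on any collision
def pvBLoop : List Int → PySem.Set Int → Bool
  | [], _ => true
  | x :: rest, reachable =>
    let cands : PySem.Set Int := PySem.Set.ofList (x :: reachable.map (· + x))
    if PySem.Set.inter cands reachable ≠ [] ∨ PySem.Set.len cands ≠ PySem.Set.len reachable + 1 then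
      false
    else
      pvBLoop rest (PySem.Set.union reachable cands)

def check_special_subset_sum_alt (S : List Int) : Bool :=
  let T := PySem.List.sorted S (fun x => x) false
  let l : Int := PySem.Int.floordiv ((T.length : Int) + 1) 2
  let r : Int := l - 1
  if (PySem.List.slice T none (some l)).sum ≤ (PySem.List.slice T (some (-r)) none).sum then
    false
  else
    pvBLoop T PySem.Set.empty

-- ===== PRECONDITION & SPEC =====
def Spec_check_special_subset_sum (S : List Int) (out : Bool) : Prop := out = check_special_subset_sum_alt S
instance (S : List Int) (out : Bool) : Decidable (Spec_check_special_subset_sum S out) := by unfold Spec_check_special_subset_sum; infer_instance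

-- ===== CLAIM (what is proved, stated in full; the proofs are below) =====
def Claim_equal_check_special_subset_sum : Prop := ∀ (S : List Int), Dom_check_special_subset_sum S → Spec_check_special_subset_sum S (check_special_subset_sum S)

-- ===== LEMMAS AND PROOFS =====

-- sums of all non-empty subsequences, by head recursion (the common reference point)
def pvAllS : List Int → List Int
  | [] => []
  | a :: t => a :: ((pvAllS t).map (a + ·) ++ pvAllS t)

-- B's accumulator of subset sums, as a plain list fold (reference semantics of the loop state)
def pvExtend : List Int → List Int → List Int
  | acc, [] => acc
  | acc, x :: rest => pvExtend (acc ++ x :: acc.map (· + x)) rest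

lemma pvOfList_len_eq_iff (l : List Int) : (PySem.Set.ofList l).length = l.length ↔ l.Nodup := by
  induction l using List.reverseRecOn with
  | nil => simp [PySem.Set.ofList]
  | append_singleton xs x ih =>
    rw [PySem.Set.ofList_append_singleton, PySem.Set.add_eq_ite]
    have hmem := PySem.Set.mem_ofList xs x
    by_cases hx : x ∈ PySem.Set.ofList xs
    · simp only [if_pos hx]
      have h1 := PySem.Set.length_ofList_le (xs := xs)
      have hx' : x ∈ xs := hmem.1 hx
      simp [List.nodup_append]
      constructor
      · intro h; omega
      · intro h; exact absurd hx' (by tauto)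
    · simp only [if_neg hx]
      simp [List.nodup_append, ← ih]
      intro _ a hm heq
      exact hx (hmem.2 (heq ▸ hm))

lemma pvExtend_prefix (rest : List Int) : ∀ acc, acc <+: pvExtend acc rest := by
  induction rest with
  | nil => intro acc; exact List.prefix_rfl
  | cons x rest ih =>
    intro acc
    exact List.IsPrefix.trans (List.prefix_append _ _) (ih _)

lemma pvExtend_perm_congr (rest : List Int) : ∀ {a b : List Int}, a.Perm b →
    (pvExtend a rest).Perm (pvExtend b rest) := by
  induction rest with
  | nil => intro a b h; exact h
  | cons x rest ih =>
    intro a b h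
    exact ih (h.append ((h.map _).cons x))

lemma pvCombos_big : ∀ (l : List Int) (i : Nat), l.length < i → pvCombos i l = [] := by
  intro l
  induction l with
  | nil => intro i h; match i, h with | n+1, _ => rfl
  | cons a t ih =>
    intro i h
    match i, h with
    | n+1, h =>
      simp only [pvCombos]
      rw [ih n (by simpa using h), ih (n+1) (by simp at h; omega)]
      rfl

lemma pvFlatMap_append_perm {α β : Type} (l : List α) (f g : α → List β) :
    (l.flatMap fun a => f a ++ g a).Perm (l.flatMap f ++ l.flatMap g) := by
  induction l with
  | nil => simp
  | cons a t ih =>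
    simp only [List.flatMap_cons]
    refine (ih.append_left (f a ++ g a)).trans ?_
    simp only [List.append_assoc]
    exact (List.perm_append_comm_assoc (g a) (t.flatMap f) (t.flatMap g)).append_left (f a)

lemma pvFlatMap_cons_perm {α β : Type} (l : List α) (q : α → β) (h : α → List β) :
    (l.flatMap fun a => q a :: h a).Perm (l.map q ++ l.flatMap h) := by
  have := pvFlatMap_append_perm l (fun a => [q a]) h
  simpa [← List.map_eq_flatMap] using this

lemma pvCombos_sums_perm (T : List Int) :
    (((List.range T.length).flatMap fun k => pvCombos (k + 1) T).map (fun s => s.sum)).Perm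
      (pvAllS T) := by
  induction T with
  | nil => simp [pvAllS]
  | cons a t ih =>
    have hstep : ((List.range (t.length + 1)).flatMap fun k => pvCombos (k + 1) (a :: t)) =
        (List.range (t.length + 1)).flatMap fun k =>
          ((pvCombos k t).map (a :: ·) ++ pvCombos (k + 1) t) := rfl
    have hsplit := pvFlatMap_append_perm (List.range (t.length + 1))
      (fun k => (pvCombos k t).map (a :: ·)) (fun k => pvCombos (k + 1) t)
    have hf : ((List.range (t.length + 1)).flatMap fun k => (pvCombos k t).map (a :: ·)) =
        ([] :: ((List.range t.length).flatMap fun k => pvCombos (k + 1) t)).map (a :: ·) := by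
      rw [List.range_succ_eq_map]
      simp [List.flatMap_cons, List.flatMap_map, pvCombos, List.map_flatMap]
    have hg : ((List.range (t.length + 1)).flatMap fun k => pvCombos (k + 1) t) =
        ((List.range t.length).flatMap fun k => pvCombos (k + 1) t) := by
      rw [List.range_succ, List.flatMap_append]
      simp [pvCombos_big t (t.length + 1) (by omega)]
    simp only [List.length_cons, hstep]
    refine ((hsplit.map (fun s => s.sum)).trans ?_)
    rw [List.map_append, hf, hg]
    set C := ((List.range t.length).flatMap fun k => pvCombos (k + 1) t) with hC
    have hms : ((([] :: C).map (a :: ·)).map fun s => s.sum) =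
        a :: (C.map fun s => s.sum).map (a + ·) := by
      simp [List.map_map, Function.comp]
    rw [hms]
    show (a :: ((C.map fun s => s.sum).map (a + ·) ++ C.map fun s => s.sum)).Perm (pvAllS (a :: t))
    exact ((ih.map (a + ·)).append ih).cons a

lemma pvExtend_perm_allS : ∀ (rest acc : List Int),
    (pvExtend acc rest).Perm
      (acc ++ (pvAllS rest ++ (pvAllS rest).flatMap fun s => acc.map (· + s))) := by
  intro rest
  induction rest with
  | nil => intro acc; simp [pvExtend, pvAllS]
  | cons x rest ih =>
    intro acc
    refine (ih (acc ++ x :: acc.map (· + x))).trans ?_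
    rw [← Multiset.coe_eq_coe]
    simp only [pvAllS, List.flatMap_cons, List.flatMap_append, List.flatMap_map,
      List.map_append, List.map_cons, List.map_map, Function.comp_def, add_assoc]
    have h1 := Multiset.coe_eq_coe.2 (pvFlatMap_append_perm (pvAllS rest)
      (fun s => acc.map (fun y => y + s)) (fun s => (x + s) :: acc.map (fun y => y + (x + s))))
    have h2 := Multiset.coe_eq_coe.2 (pvFlatMap_cons_perm (pvAllS rest)
      (fun s => x + s) (fun s => acc.map (fun y => y + (x + s))))
    simp only [← Multiset.coe_add] at h1 h2 ⊢
    rw [h1, h2]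
    simp only [← Multiset.cons_coe, ← Multiset.singleton_add, ← Multiset.coe_add]
    abel

lemma pvBLoop_eq (rest : List Int) : ∀ (reach : PySem.Set Int), reach.Nodup →
    pvBLoop rest reach = decide (pvExtend reach rest).Nodup := by
  induction rest with
  | nil => intro reach hnd; simp [pvBLoop, pvExtend, hnd]
  | cons x rest ih =>
    intro reach hnd
    have hF : (PySem.Set.inter (PySem.Set.ofList (x :: reach.map (· + x))) reach ≠ [] ∨
        PySem.Set.len (PySem.Set.ofList (x :: reach.map (· + x))) ≠ PySem.Set.len reach + 1) ↔
        ¬ (reach ++ x :: reach.map (· + x)).Nodup := by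
      rw [List.nodup_append]
      constructor
      · rintro (h | h) ⟨_, hn2, hdisj⟩
        · rcases List.exists_mem_of_ne_nil _ h with ⟨y, hy⟩
          have := (PySem.Set.mem_inter _ _ y).1 hy
          have hy1 := (PySem.Set.mem_ofList _ y).1 this.1
          exact hdisj _ this.2 _ hy1 rfl
        · apply h
          have hlen : (x :: reach.map (· + x)).length = reach.length + 1 := by simp
          have := (pvOfList_len_eq_iff (x :: reach.map (· + x))).2 hn2
          simp only [PySem.Set.len, this, hlen]
          push_cast
          ring
      · intro h
        by_cases hn2 : (x :: reach.map (· + x)).Nodup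
        · left
          have hdisj : ¬ (∀ a ∈ reach, ∀ b ∈ x :: reach.map (· + x), a ≠ b) :=
            fun hd => h ⟨hnd, hn2, hd⟩
          push Not at hdisj
          rcases hdisj with ⟨y, hy2, b, hy1, rfl⟩
          intro hnil
          have : y ∈ PySem.Set.inter (PySem.Set.ofList (x :: reach.map (· + x))) reach :=
            (PySem.Set.mem_inter _ _ y).2 ⟨(PySem.Set.mem_ofList _ y).2 hy1, hy2⟩
          simp [hnil] at this
        · right
          intro hlen
          apply hn2
          have hlen' : (x :: reach.map (· + x)).length = reach.length + 1 := by simp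
          rw [← pvOfList_len_eq_iff]
          simp only [PySem.Set.len] at hlen
          omega
    show (if _ then false else _) = _
    by_cases hN : (reach ++ x :: reach.map (· + x)).Nodup
    · rw [if_neg (by rw [hF]; exact fun h => h hN)]
      have hcand : (PySem.Set.union reach (PySem.Set.ofList (x :: reach.map (· + x)))).Perm
          (reach ++ x :: reach.map (· + x)) := by
        refine (List.perm_ext_iff_of_nodup (PySem.Set.nodup_union _ _ hnd) hN).2 ?_
        intro y
        rw [PySem.Set.mem_union, PySem.Set.mem_ofList, List.mem_append]
      rw [ih _ (PySem.Set.nodup_union _ _ hnd)]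
      show _ = decide (pvExtend (reach ++ x :: reach.map (· + x)) rest).Nodup
      congr 1
      exact propext (pvExtend_perm_congr rest hcand).nodup_iff
    · rw [if_pos (hF.2 hN)]
      show false = decide (pvExtend (reach ++ x :: reach.map (· + x)) rest).Nodup
      have : ¬ (pvExtend (reach ++ x :: reach.map (· + x)) rest).Nodup := by
        intro hgood
        exact hN (hgood.sublist (pvExtend_prefix rest _).sublist)
      simp [this]

lemma pvA_sums_nodup_iff (T : List Int) :
    (((PySem.List.pyRange 1 ((T.length : Int) + 1) 1).foldl
        (fun acc i => acc ++ pvCombos i.toNat T) ([] : List (List Int))).map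
          (fun s => s.sum)).Nodup ↔ (pvExtend [] T).Nodup := by
  rw [PySem.List.foldl_append_eq_flatMap]
  rw [PySem.List.pyRange_one]
  have h1 : ((T.length : Int) + 1 - 1).toNat = T.length := by omega
  rw [h1, List.flatMap_map]
  have h2 : (fun k : Nat => pvCombos (1 + (k : Int)).toNat T) = fun k => pvCombos (k + 1) T := by
    funext k; congr 1; omega
  rw [h2]
  simp only [List.nil_append]
  have hA := pvCombos_sums_perm T
  have hB := pvExtend_perm_allS T []
  simp only [List.map_nil, List.nil_append] at hB
  have hnil : List.flatMap (fun _ => ([] : List Int)) (pvAllS T) = [] := by simp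
  rw [hnil, List.append_nil] at hB
  rw [hA.nodup_iff, hB.nodup_iff]

-- ===== VERDICT (by name: the statement is the Claim_ definition above) =====
theorem check_special_subset_sum_spec : Claim_equal_check_special_subset_sum := by
  intro S _
  unfold Spec_check_special_subset_sum
  unfold check_special_subset_sum check_special_subset_sum_alt
  set T := PySem.List.sorted S (fun x => x) false with hT
  by_cases hc : (PySem.List.slice T none (some (PySem.Int.floordiv ((T.length : Int) + 1) 2))).sum ≤
      (PySem.List.slice T (some (-(PySem.Int.floordiv ((T.length : Int) + 1) 2 - 1))) none).sum
  · simp only [if_pos hc]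
  · simp only [if_neg hc]
    rw [pvBLoop_eq T PySem.Set.empty List.nodup_nil]
    by_cases hn : (pvExtend [] T).Nodup
    · rw [if_neg]
      · simp [hn]
      · simp only [ne_eq, not_not]
        rw [eq_comm, pvOfList_len_eq_iff, pvA_sums_nodup_iff]
        exact hn
    · rw [if_pos]
      · simp [hn]
      · rw [Ne, eq_comm, pvOfList_len_eq_iff, pvA_sums_nodup_iff]
        exact hn
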